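-- pv_equiv track=rewrite | github.com/FederatedAI/FATE | python/federatedml/util/data_transform.py | change_tag_to_str
-- ===== SOURCE A (Python) =====
-- def change_tag_to_str(value, tags_dict=None, delimitor=",", feature_offset=0,
--                       tag_value_delimitor=":"):
--     vals = value.split(delimitor, -1)
--     ret = [''] * len(tags_dict)
--
--     vals = vals[feature_offset:]
--
--     for i in range(len(vals)):
--         tag, value = vals[i].split(tag_value_delimitor, -1)
--         idx = tags_dict.get(tag, None)
--         if idx is not None:
--             ret[idx] = value
--
--     return ret
-- ===== SOURCE B (Python) =====
-- def change_tag_to_str(value, tags_dict=None, delimitor=",", feature_offset=0,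
--                       tag_value_delimitor=":"):
--     # Pass 1: index the input entries by tag (later duplicates overwrite).
--     value_by_tag = {}
--     for entry in value.split(delimitor, -1)[feature_offset:]:
--         tag, tag_value = entry.split(tag_value_delimitor, -1)
--         value_by_tag[tag] = tag_value
--     # Pass 2: gather by the known tags, writing each slot from the index.
--     ret = [''] * len(tags_dict)
--     for tag, idx in tags_dict.items():
--         if tag in value_by_tag:
--             ret[idx] = value_by_tag[tag]
--     return ret
-- ===== Notes on version B (the rewrite author's own statement) =====
-- stated objective: alternative
-- what changed: A scatters: it walks the input entries and for each tag does a dict lookup to find its slot; B inverts the traversal: one pass builds an index value_by_tag over the input entries, then a pass over tags_dict itself gathers each slot's value from that index.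
-- outside the precondition, e.g. on change_tag_to_str('b:y,a:x', {'a': 0, 'b': 0}, ',', 0, ':'): A returns ['x', ''], B returns ['y', '']; on change_tag_to_str('b:y,a:x', {'a': 1, 'b': -1}, ',', 0, ':'): A returns ['', 'x'], B returns ['', 'y']
import Mathlib
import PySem

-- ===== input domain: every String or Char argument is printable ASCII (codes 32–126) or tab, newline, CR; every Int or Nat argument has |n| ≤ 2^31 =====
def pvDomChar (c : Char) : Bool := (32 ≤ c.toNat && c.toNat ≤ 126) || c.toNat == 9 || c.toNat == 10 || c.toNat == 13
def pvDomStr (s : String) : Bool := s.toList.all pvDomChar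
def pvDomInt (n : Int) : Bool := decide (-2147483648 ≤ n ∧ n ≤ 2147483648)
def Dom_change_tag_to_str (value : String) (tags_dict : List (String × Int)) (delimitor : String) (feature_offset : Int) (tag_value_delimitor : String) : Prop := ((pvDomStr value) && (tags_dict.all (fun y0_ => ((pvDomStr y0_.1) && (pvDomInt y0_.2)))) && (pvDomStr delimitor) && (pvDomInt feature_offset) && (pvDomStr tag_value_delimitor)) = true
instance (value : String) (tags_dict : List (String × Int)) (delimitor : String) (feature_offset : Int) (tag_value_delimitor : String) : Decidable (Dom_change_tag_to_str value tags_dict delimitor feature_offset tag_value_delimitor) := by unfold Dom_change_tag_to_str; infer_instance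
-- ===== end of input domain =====

-- B inverts A's traversal (index the input entries once by tag, then gather per known tag); objective: alternative
-- decomposition, same cost.

-- e.split(sep, -1) (shared Python primitive combination; used by both ports and Pre_)
def pvSplit2 (e sep : String) : List String := (PySem.Str.splitMax? e sep (-1)).getD []
-- Python's normalization of a list-assignment index
def pvNorm (n : Nat) (i : Int) : Int := if i < 0 then i + n else i
-- the tags occurring in the (sliced) input entries
def pvTagsOf (vals : List String) (tvd : String) : List String :=
  vals.filterMap (fun e => match pvSplit2 e tvd with | [t, _] => some t | _ => none)

-- ===== PORT A =====
def change_tag_to_str (value : String) (tags_dict : List (String × Int)) (delimitor : String) (feature_offset : Int) (tag_value_delimitor : String) : List String :=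
  let vals := pvSplit2 value delimitor            -- value.split(delimitor, -1); delimitor = "" (ValueError) excluded by Pre_
  let ret := List.replicate tags_dict.length ""
  let vals2 := PySem.List.slice vals (some feature_offset) none
  (PySem.List.pyRange 0 (PySem.List.len vals2)).foldl (fun ret i =>
    match pvSplit2 (PySem.List.pyGetD vals2 i "") tag_value_delimitor with
    | [tag, v] =>
        match (PySem.Dict.mk tags_dict).get? tag with
        | some idx => PySem.List.pySetD ret idx v  -- ret[idx] = v; out-of-range index (IndexError) excluded by Pre_
        | none => ret
    | _ => ret                                     -- unpacking raises ValueError; excluded by Pre_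
  ) ret

-- ===== PORT B =====
def change_tag_to_str_alt (value : String) (tags_dict : List (String × Int)) (delimitor : String) (feature_offset : Int) (tag_value_delimitor : String) : List String :=
  let vbt := (PySem.List.slice (pvSplit2 value delimitor) (some feature_offset) none).foldl
      (fun d entry =>
        match pvSplit2 entry tag_value_delimitor with
        | [tag, tv] => d.insert tag tv
        | _ => d)                                  -- unpacking raises ValueError; excluded by Pre_
      PySem.Dict.empty
  tags_dict.foldl (fun ret q =>
      match vbt.get? q.1 with
      | some v => PySem.List.pySetD ret q.2 v      -- ret[idx] = value_by_tag[tag]; out-of-range excluded by Pre_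
      | none => ret)
    (List.replicate tags_dict.length "")

-- ===== PRECONDITION & SPEC =====
-- Pre_ excludes inputs where A raises: empty delimiters and entries not splitting into exactly two parts (ValueError),
-- and matched indices outside [-n, n) (IndexError).  It also excludes the accidental-order corners on which A still
-- returns: duplicate tag keys, and tag maps in which two matched tags target the same normalized slot — which write
-- wins there is an artefact of traversal order.
def Pre_change_tag_to_str (value : String) (tags_dict : List (String × Int)) (delimitor : String) (feature_offset : Int) (tag_value_delimitor : String) : Prop :=
  delimitor ≠ "" ∧ tag_value_delimitor ≠ "" ∧
  (∀ e ∈ PySem.List.slice (pvSplit2 value delimitor) (some feature_offset) none,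
      (pvSplit2 e tag_value_delimitor).length = 2) ∧
  (tags_dict.map Prod.fst).Nodup ∧
  (∀ q ∈ tags_dict.filter (fun q => decide (q.1 ∈ pvTagsOf (PySem.List.slice (pvSplit2 value delimitor) (some feature_offset) none) tag_value_delimitor)),
      -(tags_dict.length : Int) ≤ q.2 ∧ q.2 < (tags_dict.length : Int)) ∧
  ((tags_dict.filter (fun q => decide (q.1 ∈ pvTagsOf (PySem.List.slice (pvSplit2 value delimitor) (some feature_offset) none) tag_value_delimitor))).map
      (fun q => pvNorm tags_dict.length q.2)).Nodup
instance (value : String) (tags_dict : List (String × Int)) (delimitor : String) (feature_offset : Int) (tag_value_delimitor : String) : Decidable (Pre_change_tag_to_str value tags_dict delimitor feature_offset tag_value_delimitor) := by unfold Pre_change_tag_to_str; infer_instance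

def pvWitness_change_tag_to_str : String × (List (String × Int)) × String × Int × String :=
  ("a:1,b:2", [("a", 0), ("b", 1)], ",", 0, ":")

def Spec_change_tag_to_str (value : String) (tags_dict : List (String × Int)) (delimitor : String) (feature_offset : Int) (tag_value_delimitor : String) (out : List String) : Prop := out = change_tag_to_str_alt value tags_dict delimitor feature_offset tag_value_delimitor
instance (value : String) (tags_dict : List (String × Int)) (delimitor : String) (feature_offset : Int) (tag_value_delimitor : String) (out : List String) : Decidable (Spec_change_tag_to_str value tags_dict delimitor feature_offset tag_value_delimitor out) := by unfold Spec_change_tag_to_str; infer_instance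

-- ===== CLAIM (what is proved, stated in full; the proofs are below) =====
def Claim_equal_change_tag_to_str : Prop := ∀ (value : String) (tags_dict : List (String × Int)) (delimitor : String) (feature_offset : Int) (tag_value_delimitor : String), Dom_change_tag_to_str value tags_dict delimitor feature_offset tag_value_delimitor → Pre_change_tag_to_str value tags_dict delimitor feature_offset tag_value_delimitor → Spec_change_tag_to_str value tags_dict delimitor feature_offset tag_value_delimitor (change_tag_to_str value tags_dict delimitor feature_offset tag_value_delimitor)

-- ===== LEMMAS AND PROOFS =====

-- generic conditional-write fold: both ports are instances of it
def pvWriteFold {α : Type} (f : α → Option (Int × String)) (xs : List α) (ret : List String) : List String :=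
  xs.foldl (fun r x => match f x with | some p => PySem.List.pySetD r p.1 p.2 | none => r) ret

-- A's per-entry action
def pvFA (tags_dict : List (String × Int)) (tvd : String) (e : String) : Option (Int × String) :=
  match pvSplit2 e tvd with
  | [t, v] => match (PySem.Dict.mk tags_dict).get? t with
              | some idx => some (idx, v)
              | none => none
  | _ => none

-- B's per-tag action
def pvFB (vbt : PySem.Dict String String) (q : String × Int) : Option (Int × String) :=
  (vbt.get? q.1).map (fun v => (q.2, v))

-- the last value carried by tag t among the entries (what B's dict stores for t)
def pvLastVal (vals2 : List String) (tvd t : String) : Option String :=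
  (vals2.filterMap (fun e => match pvSplit2 e tvd with
    | [t', v] => if t' == t then some v else none
    | _ => none)).getLast?

theorem pvSetD_eq_set (xs : List String) (i : Int) (v : String)
    (h1 : -(xs.length : Int) ≤ i) (h2 : i < (xs.length : Int)) :
    PySem.List.pySetD xs i v = xs.set (pvNorm xs.length i).toNat v := by
  unfold pvNorm
  by_cases h0 : i < 0
  · rw [if_pos h0]
    simp only [PySem.List.pySetD, PySem.List.pySet?, PySem.List.pyIdx?, if_neg (not_le.mpr h0), if_pos h1]
    simp only [Option.map_some, Option.getD_some]
    congr 1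
    omega
  · rw [if_neg h0]
    exact PySem.List.pySetD_of_nonneg xs v (not_lt.mp h0)

theorem pvLength_writeFold {α : Type} (f : α → Option (Int × String)) (xs : List α) (ret : List String) :
    (pvWriteFold f xs ret).length = ret.length := by
  induction xs generalizing ret with
  | nil => rfl
  | cons x xs ih =>
    simp only [pvWriteFold, List.foldl_cons]
    cases h : f x with
    | none => simpa using ih ret
    | some p =>
      show (pvWriteFold f xs (PySem.List.pySetD ret p.1 p.2)).length = ret.length
      rw [ih _]
      exact PySem.List.length_pySetD ret p.1 p.2

theorem pvWriteFold_getElem? {α : Type} (f : α → Option (Int × String)) (xs : List α) (ret : List String)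
    (j : Nat)
    (hr : ∀ x ∈ xs, ∀ p, f x = some p → -(ret.length : Int) ≤ p.1 ∧ p.1 < (ret.length : Int)) :
    (pvWriteFold f xs ret)[j]? =
      ((((xs.filterMap f).filter (fun p => pvNorm ret.length p.1 == (j : Int))).getLast?.map
        (fun p => some p.2)).getD ret[j]?) := by
  induction xs using List.reverseRecOn with
  | nil => simp [pvWriteFold]
  | append_singleton xs x ih =>
    have hr' : ∀ y ∈ xs, ∀ p, f y = some p → -(ret.length : Int) ≤ p.1 ∧ p.1 < (ret.length : Int) :=
      fun y hy => hr y (by simp [hy])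
    have hstep : pvWriteFold f (xs ++ [x]) ret =
        (match f x with
          | some p => PySem.List.pySetD (pvWriteFold f xs ret) p.1 p.2
          | none => pvWriteFold f xs ret) := by
      simp [pvWriteFold, List.foldl_append]
    have hlen : (pvWriteFold f xs ret).length = ret.length := pvLength_writeFold f xs ret
    rw [hstep]
    cases hx : f x with
    | none => simp [hx, ih hr']
    | some p =>
      dsimp only
      have hp := hr x (by simp) p hx
      have hnormrange : 0 ≤ pvNorm ret.length p.1 ∧ pvNorm ret.length p.1 < (ret.length : Int) := by
        unfold pvNorm; split <;> omega
      rw [pvSetD_eq_set _ _ _ (by omega) (by omega)]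
      rw [List.getElem?_set]
      by_cases hj : pvNorm ret.length p.1 = (j : Int)
      · have hjlt : j < ret.length := by omega
        have hkj : (pvNorm (pvWriteFold f xs ret).length p.1).toNat = j := by
          rw [hlen]; omega
        rw [if_pos hkj]
        have hlt : (pvNorm (pvWriteFold f xs ret).length p.1).toNat < (pvWriteFold f xs ret).length := by
          rw [hlen]; omega
        rw [if_pos hlt]
        simp [hx, List.filter_append, hj]
      · have hkj : ¬ (pvNorm (pvWriteFold f xs ret).length p.1).toNat = j := by
          rw [hlen]; omega
        rw [if_neg hkj]
        rw [ih hr']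
        simp [hx, List.filter_append, hj]

theorem pvPortA_eq (value : String) (tags_dict : List (String × Int)) (delimitor : String)
    (feature_offset : Int) (tag_value_delimitor : String) :
    change_tag_to_str value tags_dict delimitor feature_offset tag_value_delimitor =
      pvWriteFold (pvFA tags_dict tag_value_delimitor)
        (PySem.List.slice (pvSplit2 value delimitor) (some feature_offset) none)
        (List.replicate tags_dict.length "") := by
  simp only [change_tag_to_str, pvWriteFold]
  refine Eq.trans (PySem.List.foldl_pyRange_pyGetD
      (PySem.List.slice (pvSplit2 value delimitor) (some feature_offset)) ""
      (fun ret e =>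
        match pvSplit2 e tag_value_delimitor with
        | [tag, v] =>
            (match (PySem.Dict.mk tags_dict).get? tag with
             | some idx => PySem.List.pySetD ret idx v
             | none => ret)
        | _ => ret)
      (List.replicate tags_dict.length "") (le_refl 0)) ?_
  rw [Int.toNat_zero, List.drop_zero]
  apply List.foldl_ext
  intro acc e _
  unfold pvFA
  cases hx : pvSplit2 e tag_value_delimitor with
  | nil => rfl
  | cons a l =>
    cases l with
    | nil => rfl
    | cons b l2 =>
      cases l2 with
      | nil => dsimp only; cases (PySem.Dict.mk tags_dict).get? a <;> rfl
      | cons c l3 => rfl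

theorem pvPortB_eq (value : String) (tags_dict : List (String × Int)) (delimitor : String)
    (feature_offset : Int) (tag_value_delimitor : String) :
    change_tag_to_str_alt value tags_dict delimitor feature_offset tag_value_delimitor =
      pvWriteFold (pvFB ((PySem.List.slice (pvSplit2 value delimitor) (some feature_offset) none).foldl
          (fun d entry => match pvSplit2 entry tag_value_delimitor with
            | [tag, tv] => d.insert tag tv
            | _ => d) PySem.Dict.empty))
        tags_dict (List.replicate tags_dict.length "") := by
  unfold change_tag_to_str_alt pvWriteFold pvFB
  apply List.foldl_ext
  intro acc q _
  cases (_ : PySem.Dict String String).get? q.1 <;> rfl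

theorem pvVbt_get (vals2 : List String) (tvd t : String) :
    ((vals2.foldl (fun d entry => match pvSplit2 entry tvd with
        | [tag, tv] => d.insert tag tv
        | _ => d) PySem.Dict.empty).get? t) = pvLastVal vals2 tvd t := by
  induction vals2 using List.reverseRecOn with
  | nil => simp [pvLastVal, PySem.Dict.get?_empty]
  | append_singleton xs x ih =>
    rw [List.foldl_append, List.foldl_cons, List.foldl_nil]
    unfold pvLastVal
    rw [List.filterMap_append]
    cases hx : pvSplit2 x tvd with
    | nil => simpa [hx, pvLastVal] using ih
    | cons a l =>
      cases l with
      | nil => simpa [hx, pvLastVal] using ih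
      | cons b l2 =>
        cases l2 with
        | nil =>
          by_cases hab : a = t
          · simp [hx, hab, PySem.Dict.get?_insert_self]
          · rw [PySem.Dict.get?_insert_of_ne _ _ (fun h => hab h.symm)]
            simpa [hx, hab, pvLastVal] using ih
        | cons c l3 => simpa [hx, pvLastVal] using ih

theorem pvLastVal_mem (vals2 : List String) (tvd t : String) (v : String)
    (h : pvLastVal vals2 tvd t = some v) : t ∈ pvTagsOf vals2 tvd := by
  unfold pvLastVal at h
  have hmem := List.mem_of_getLast? h
  rw [List.mem_filterMap] at hmem
  obtain ⟨e, he, hfe⟩ := hmem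
  unfold pvTagsOf
  rw [List.mem_filterMap]
  refine ⟨e, he, ?_⟩
  revert hfe
  cases hx : pvSplit2 e tvd with
  | nil => simp
  | cons a l =>
    cases l with
    | nil => simp
    | cons b l2 =>
      cases l2 with
      | nil => by_cases hab : a = t <;> simp [hab]
      | cons c l3 => simp

theorem pvFilterMap_if_eq_single {α β : Type} [DecidableEq α] (l : List α) (q : α) (c : Option β)
    (hnd : l.Nodup) (hq : q ∈ l) :
    l.filterMap (fun x => if x = q then c else none) = c.toList := by
  induction l with
  | nil => simp at hq
  | cons a l ih =>
    rw [List.filterMap_cons]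
    rcases List.mem_cons.mp hq with h | h
    · subst h
      have hnq : q ∉ l := (List.nodup_cons.mp hnd).1
      have hnil : l.filterMap (fun x => if x = q then c else none) = [] := by
        rw [List.filterMap_eq_nil_iff]
        intro x hx
        have hxq : x ≠ q := fun he => hnq (he ▸ hx)
        rw [if_neg hxq]
      cases c <;> simp [hnil]
    · have hna : a ≠ q := fun he => (List.nodup_cons.mp hnd).1 (he ▸ h)
      rw [if_neg hna]
      exact ih (List.nodup_cons.mp hnd).2 h

-- ===== VERDICT (by name: the statement is the Claim_ definition above) =====
theorem pvMapSnd_congr (o o' : Option (Int × String))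
    (h : o.map Prod.snd = o'.map Prod.snd) :
    o.map (fun p => some p.2) = o'.map (fun p => some p.2) := by
  cases o <;> cases o' <;> simp_all

theorem change_tag_to_str_spec : Claim_equal_change_tag_to_str := by
  intro value tags_dict delimitor feature_offset tag_value_delimitor _ hpre
  obtain ⟨_, _, hshape, hkeys, hrange, hnorm⟩ := hpre
  unfold Spec_change_tag_to_str
  rw [pvPortA_eq, pvPortB_eq]
  set vals2 := PySem.List.slice (pvSplit2 value delimitor) (some feature_offset) none with hvals2
  set tags := pvTagsOf vals2 tag_value_delimitor with htags
  -- basic facts about the tag dictionary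
  have hitems : (PySem.Dict.mk tags_dict).items = tags_dict := rfl
  have hkeysd : (PySem.Dict.mk tags_dict).keys.Nodup := hkeys
  have hnd : tags_dict.Nodup := List.Nodup.of_map _ hkeys
  have hmemtags : ∀ e ∈ vals2, ∀ t v, pvSplit2 e tag_value_delimitor = [t, v] → t ∈ tags := by
    intro e he t v hx
    rw [htags]
    unfold pvTagsOf
    exact List.mem_filterMap.mpr ⟨e, he, by rw [hx]⟩
  have hget_mem : ∀ t idx, (PySem.Dict.mk tags_dict).get? t = some idx → (t, idx) ∈ tags_dict := by
    intro t idx h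
    exact PySem.Dict.mem_items_of_get?_eq_some _ h
  have hmem_get : ∀ q ∈ tags_dict, (PySem.Dict.mk tags_dict).get? q.1 = some q.2 := by
    intro q hq
    exact PySem.Dict.get?_of_mem_items _ (by exact hq) hkeysd
  have hrange' : ∀ q ∈ tags_dict, q.1 ∈ tags →
      -((tags_dict.length : Nat) : Int) ≤ q.2 ∧ q.2 < ((tags_dict.length : Nat) : Int) := by
    intro q hq ht
    exact hrange q (List.mem_filter.mpr ⟨hq, by simpa using ht⟩)
  have huniq : ∀ q ∈ tags_dict, ∀ q' ∈ tags_dict, q.1 ∈ tags → q'.1 ∈ tags →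
      pvNorm tags_dict.length q.2 = pvNorm tags_dict.length q'.2 → q = q' := by
    intro q hq q' hq' ht ht' he
    exact List.inj_on_of_nodup_map hnorm (List.mem_filter.mpr ⟨hq, by simpa using ht⟩)
      (List.mem_filter.mpr ⟨hq', by simpa using ht'⟩) he
  have hshape2 : ∀ e ∈ vals2, ∃ t v, pvSplit2 e tag_value_delimitor = [t, v] := by
    intro e he
    have h2 := hshape e he
    cases hx : pvSplit2 e tag_value_delimitor with
    | nil => rw [hx] at h2; simp at h2
    | cons a l =>
      cases l with
      | nil => rw [hx] at h2; simp at h2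
      | cons b l2 =>
        cases l2 with
        | nil => exact ⟨a, b, rfl⟩
        | cons c l3 => rw [hx] at h2; simp at h2
  have hfa : ∀ e ∈ vals2, ∀ p, pvFA tags_dict tag_value_delimitor e = some p →
      ∃ t v, pvSplit2 e tag_value_delimitor = [t, v] ∧
        (PySem.Dict.mk tags_dict).get? t = some p.1 ∧ p.2 = v ∧ (t, p.1) ∈ tags_dict ∧ t ∈ tags := by
    intro e he p hfe
    obtain ⟨t, v, hx⟩ := hshape2 e he
    unfold pvFA at hfe
    rw [hx] at hfe
    dsimp only at hfe
    cases hg : (PySem.Dict.mk tags_dict).get? t with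
    | none => rw [hg] at hfe; simp at hfe
    | some idx =>
      rw [hg] at hfe
      simp only [Option.some.injEq] at hfe
      subst hfe
      exact ⟨t, v, hx, hg, rfl, hget_mem t idx hg, hmemtags e he t v hx⟩
  have hrA : ∀ e ∈ vals2, ∀ p, pvFA tags_dict tag_value_delimitor e = some p →
      -(((List.replicate tags_dict.length "").length : Nat) : Int) ≤ p.1 ∧
        p.1 < (((List.replicate tags_dict.length "").length : Nat) : Int) := by
    intro e he p hfe
    obtain ⟨t, v, _, _, _, hmem, htg⟩ := hfa e he p hfe
    have := hrange' (t, p.1) hmem htg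
    simpa using this
  have hrB : ∀ q ∈ tags_dict, ∀ p,
      pvFB (vals2.foldl (fun d entry => match pvSplit2 entry tag_value_delimitor with
        | [tag, tv] => d.insert tag tv
        | _ => d) PySem.Dict.empty) q = some p →
      -(((List.replicate tags_dict.length "").length : Nat) : Int) ≤ p.1 ∧
        p.1 < (((List.replicate tags_dict.length "").length : Nat) : Int) := by
    intro q hq p hfe
    unfold pvFB at hfe
    rw [pvVbt_get] at hfe
    cases hl : pvLastVal vals2 tag_value_delimitor q.1 with
    | none => rw [hl] at hfe; simp at hfe
    | some v =>
      rw [hl] at hfe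
      simp only [Option.map_some, Option.some.injEq] at hfe
      subst hfe
      have := hrange' q hq (by rw [htags]; exact pvLastVal_mem _ _ _ _ hl)
      simpa using this
  apply List.ext_getElem?
  intro j
  rw [pvWriteFold_getElem? _ _ _ j hrA, pvWriteFold_getElem? _ _ _ j hrB]
  congr 1
  apply pvMapSnd_congr
  simp only [List.length_replicate]
  by_cases hq : ∃ q ∈ tags_dict, q.1 ∈ tags ∧ pvNorm tags_dict.length q.2 = (j : Int)
  · obtain ⟨q, hqmem, hqt, hqn⟩ := hq
    -- A side collapses to the entries carrying q's tag
    have hLA : ((vals2.filterMap (pvFA tags_dict tag_value_delimitor)).filter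
          (fun p => pvNorm tags_dict.length p.1 == (j : Int))) =
        (vals2.filterMap (fun e => match pvSplit2 e tag_value_delimitor with
          | [t', v] => if t' == q.1 then some v else none
          | _ => none)).map (fun v => (q.2, v)) := by
      rw [List.filter_filterMap, List.map_filterMap]
      apply List.filterMap_congr
      intro e he
      obtain ⟨t, v, hx⟩ := hshape2 e he
      unfold pvFA
      rw [hx]
      dsimp only
      cases hg : (PySem.Dict.mk tags_dict).get? t with
      | none =>
        have htq : t ≠ q.1 := by
          intro heq
          rw [heq, hmem_get q hqmem] at hg
          simp at hg
        simp [htq]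
      | some idx =>
        by_cases hnj : pvNorm tags_dict.length idx = (j : Int)
        · have heq : (t, idx) = q :=
            huniq (t, idx) (hget_mem t idx hg) q hqmem (hmemtags e he t v hx) hqt
              (hnj.trans hqn.symm)
          have ht : t = q.1 := congrArg Prod.fst heq
          have hi : idx = q.2 := congrArg Prod.snd heq
          subst ht hi
          simp [Option.filter, hnj]
        · have htq : t ≠ q.1 := by
            intro heq
            rw [heq, hmem_get q hqmem] at hg
            have hi2 : q.2 = idx := by injection hg
            exact hnj (hi2 ▸ hqn)
          simp [Option.filter, htq, hnj]
    -- B side collapses to the single entry q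
    have hLB : ((tags_dict.filterMap (pvFB (vals2.foldl
            (fun d entry => match pvSplit2 entry tag_value_delimitor with
              | [tag, tv] => d.insert tag tv
              | _ => d) PySem.Dict.empty))).filter
          (fun p => pvNorm tags_dict.length p.1 == (j : Int))) =
        tags_dict.filterMap (fun q' => if q' = q then
          (pvLastVal vals2 tag_value_delimitor q.1).map (fun v => (q.2, v)) else none) := by
      rw [List.filter_filterMap]
      apply List.filterMap_congr
      intro q' hq'
      unfold pvFB
      rw [pvVbt_get]
      cases hl : pvLastVal vals2 tag_value_delimitor q'.1 with
      | none =>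
        by_cases hqq : q' = q
        · subst hqq; simp [Option.filter, hl]
        · simp [Option.filter, hqq]
      | some v =>
        have htg : q'.1 ∈ tags := by rw [htags]; exact pvLastVal_mem _ _ _ _ hl
        by_cases hqq : q' = q
        · subst hqq
          simp [Option.filter, hl, hqn]
        · have hnj : pvNorm tags_dict.length q'.2 ≠ (j : Int) := by
            intro hj
            exact hqq (huniq q' hq' q hqmem htg hqt (hj.trans hqn.symm))
          simp [Option.filter, hqq, hnj]
    rw [hLA, hLB, pvFilterMap_if_eq_single tags_dict q _ hnd hqmem]
    have hdef : (vals2.filterMap (fun e => match pvSplit2 e tag_value_delimitor with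
        | [t', v] => if t' == q.1 then some v else none
        | _ => none)).getLast? = pvLastVal vals2 tag_value_delimitor q.1 := rfl
    rw [List.getLast?_map, hdef]
    cases pvLastVal vals2 tag_value_delimitor q.1 <;> rfl
  · -- no tag targets slot j: both sides write nothing
    simp only [not_exists, not_and] at hq
    have hLA : ((vals2.filterMap (pvFA tags_dict tag_value_delimitor)).filter
          (fun p => pvNorm tags_dict.length p.1 == (j : Int))) = [] := by
      rw [List.filter_eq_nil_iff]
      intro p hp
      rw [List.mem_filterMap] at hp
      obtain ⟨e, he, hfe⟩ := hp
      obtain ⟨t, v, _, _, _, hmem, htg⟩ := hfa e he p hfe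
      simpa using hq (t, p.1) hmem htg
    have hLB : ((tags_dict.filterMap (pvFB (vals2.foldl
            (fun d entry => match pvSplit2 entry tag_value_delimitor with
              | [tag, tv] => d.insert tag tv
              | _ => d) PySem.Dict.empty))).filter
          (fun p => pvNorm tags_dict.length p.1 == (j : Int))) = [] := by
      rw [List.filter_eq_nil_iff]
      intro p hp
      rw [List.mem_filterMap] at hp
      obtain ⟨q, hqm, hfe⟩ := hp
      unfold pvFB at hfe
      rw [pvVbt_get] at hfe
      cases hl : pvLastVal vals2 tag_value_delimitor q.1 with
      | none => rw [hl] at hfe; simp at hfe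
      | some v =>
        rw [hl] at hfe
        simp only [Option.map_some, Option.some.injEq] at hfe
        subst hfe
        simpa using hq q hqm (by rw [htags]; exact pvLastVal_mem _ _ _ _ hl)
    rw [hLA, hLB]
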